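-- pv_equiv track=rewrite | github.com/evalentine1519/adventofcode2022 | day5.py | upgraded_mover
-- ===== SOURCE A (Python) =====
-- def upgraded_mover(stacklist, moves):
--     for move in moves:
--         source = int(move[0][1]) - 1
--         target = int(move[0][2]) - 1
--         temp = []
--
--         for i in range(int(move[0][0])):
--             temp.append(stacklist[source].pop())
--         for i in range(int(move[0][0])):
--             stacklist[target].append(temp.pop())
--
--     answer = []
--     for stack in stacklist:
--         answer.append(stack.pop())
--     return answer
-- ===== SOURCE B (Python) =====
-- def upgraded_mover(stacklist, moves):
--     # Bulk-move re-implementation: move the top `count` crates of the source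
--     # stack with one slice (two list reversals in A cancel out), instead of
--     # A's two per-crate pop/append loops through a temp stack.
--     for move in moves:
--         count = int(move[0][0])
--         source = int(move[0][1]) - 1
--         target = int(move[0][2]) - 1
--         if count > 0:
--             chunk = stacklist[source][-count:]
--             stacklist[target].extend(chunk)
--             del stacklist[source][-count:]
--     return [stack[-1] for stack in stacklist]
-- ===== Notes on version B (the rewrite author's own statement) =====
-- stated objective: simpler
-- what changed: Each move transfers the top `count` crates in one bulk slice (slice source, extend target, delete slice) instead of A's two per-crate loops through a temporary stack, exploiting that A's double pop/pop reversal cancels; the answer is a comprehension over last elements instead of a pop loop.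
import Mathlib
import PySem

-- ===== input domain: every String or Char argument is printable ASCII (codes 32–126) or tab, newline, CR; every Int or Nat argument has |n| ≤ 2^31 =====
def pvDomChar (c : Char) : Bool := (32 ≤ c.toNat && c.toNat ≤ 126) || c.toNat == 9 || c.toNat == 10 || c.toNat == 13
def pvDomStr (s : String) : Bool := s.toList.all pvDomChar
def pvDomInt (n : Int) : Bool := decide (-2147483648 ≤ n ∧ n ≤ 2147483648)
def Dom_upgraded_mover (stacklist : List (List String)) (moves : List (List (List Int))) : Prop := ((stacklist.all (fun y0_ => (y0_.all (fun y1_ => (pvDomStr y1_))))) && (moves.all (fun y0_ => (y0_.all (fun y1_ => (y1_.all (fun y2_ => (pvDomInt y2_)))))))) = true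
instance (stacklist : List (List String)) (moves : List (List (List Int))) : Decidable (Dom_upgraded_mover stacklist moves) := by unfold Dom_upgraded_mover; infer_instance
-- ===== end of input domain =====

-- B replaces A's two per-crate pop/append loops (through a temp stack) per move by one
-- bulk slice move; only the RETURN value is proved equal (both Pythons mutate stacklist,
-- A additionally pops each stack's top while building the answer, B does not).


-- ===== PORT A =====
-- `for i in range(count): temp.append(stacklist[source].pop())`
def pvPopLoopA (st : List (List String)) (temp : List String) (source : Int) : Nat → List (List String) × List String
  | 0 => (st, temp)
  | Nat.succ k =>
    match PySem.List.pop? (PySem.List.pyGetD st source []) (-1) with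
    | none => (st, temp)  -- IndexError (pop from empty list); excluded by Pre_
    | some (x, rest) => pvPopLoopA (PySem.List.pySetD st source rest) (temp ++ [x]) source k

-- `for i in range(count): stacklist[target].append(temp.pop())`
def pvAppendLoopA (st : List (List String)) (temp : List String) (target : Int) : Nat → List (List String) × List String
  | 0 => (st, temp)
  | Nat.succ k =>
    match PySem.List.pop? temp (-1) with
    | none => (st, temp)  -- IndexError; excluded by Pre_
    | some (x, rest) =>
      pvAppendLoopA (PySem.List.pySetD st target (PySem.List.pyGetD st target [] ++ [x])) rest target k

def pvMoveA (st : List (List String)) (move : List (List Int)) : List (List String) :=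
  let row := PySem.List.pyGetD move 0 []
  let source := PySem.List.pyGetD row 1 0 - 1
  let target := PySem.List.pyGetD row 2 0 - 1
  let count := (PySem.List.pyGetD row 0 0).toNat   -- range(c) iterates max(c,0) times
  let p := pvPopLoopA st [] source count
  (pvAppendLoopA p.1 p.2 target count).1

def upgraded_mover (stacklist : List (List String)) (moves : List (List (List Int))) : List String :=
  let final := moves.foldl pvMoveA stacklist
  -- `answer.append(stack.pop())` for each stack
  final.map (fun stack => ((PySem.List.pop? stack (-1)).map Prod.fst).getD "")

-- ===== PORT B =====
def pvMoveB (st : List (List String)) (move : List (List Int)) : List (List String) :=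
  let row := PySem.List.pyGetD move 0 []
  let count := PySem.List.pyGetD row 0 0
  let source := PySem.List.pyGetD row 1 0 - 1
  let target := PySem.List.pyGetD row 2 0 - 1
  if 0 < count then
    -- chunk = stacklist[source][-count:]
    let chunk := PySem.List.slice (PySem.List.pyGetD st source []) (some (-count)) none
    -- stacklist[target].extend(chunk)
    let st1 := PySem.List.pySetD st target (PySem.List.pyGetD st target [] ++ chunk)
    -- del stacklist[source][-count:]
    PySem.List.pySetD st1 source (PySem.List.slice (PySem.List.pyGetD st1 source []) none (some (-count)))
  else st

def upgraded_mover_alt (stacklist : List (List String)) (moves : List (List (List Int))) : List String :=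
  (moves.foldl pvMoveB stacklist).map (fun stack => PySem.List.pyGetD stack (-1) "")

-- ===== PRECONDITION & SPEC =====
-- Python's index normalisation: a negative in-range index counts from the end.
def pvNorm (i : Int) (n : Nat) : Nat := (if i < 0 then i + n else i).toNat

-- Effect of one move on the stack HEIGHTS only: `none` exactly when A raises IndexError
-- on this move (malformed row, 1-based index outside -len..len, or popping more crates
-- than the source stack currently holds).
def pvStep? (lens : List Nat) (move : List (List Int)) : Option (List Nat) :=
  match move with
  | (c :: s :: t :: _) :: _ =>
    if c ≤ 0 then some lens
    else if -(lens.length : Int) ≤ s - 1 ∧ s - 1 < (lens.length : Int) ∧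
            -(lens.length : Int) ≤ t - 1 ∧ t - 1 < (lens.length : Int) then
      let si := pvNorm (s - 1) lens.length
      let ti := pvNorm (t - 1) lens.length
      if c.toNat ≤ lens.getD si 0 then
        let l1 := lens.set si (lens.getD si 0 - c.toNat)
        some (l1.set ti (l1.getD ti 0 + c.toNat))
      else none
    else none
  | _ => none

def pvSim : List Nat → List (List (List Int)) → Option (List Nat)
  | lens, [] => some lens
  | lens, m :: ms =>
    match pvStep? lens m with
    | some l => pvSim l ms
    | none => none

-- Pre_ holds exactly when the Python A returns (raises no IndexError): whether a move
-- underflows depends only on the stack HEIGHTS, so Pre_ tracks the height vector through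
-- the move list in one linear pass (never the stacks' contents, and no code of either
-- port) and finally requires every stack nonempty for the answer loop's pops.
def Pre_upgraded_mover (stacklist : List (List String)) (moves : List (List (List Int))) : Prop :=
  (match pvSim (stacklist.map List.length) moves with
   | some l => l.all (fun x => 0 < x)
   | none => false) = true

instance (stacklist : List (List String)) (moves : List (List (List Int))) : Decidable (Pre_upgraded_mover stacklist moves) := by unfold Pre_upgraded_mover; infer_instance

def pvWitness_upgraded_mover : List (List String) × List (List (List Int)) :=
  ([["A", "B", "C"], ["D", "E"]], [[[2, 1, 2]], [[1, 2, 1]]])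

def Spec_upgraded_mover (stacklist : List (List String)) (moves : List (List (List Int))) (out : List String) : Prop := out = upgraded_mover_alt stacklist moves
instance (stacklist : List (List String)) (moves : List (List (List Int))) (out : List String) : Decidable (Spec_upgraded_mover stacklist moves out) := by unfold Spec_upgraded_mover; infer_instance

-- ===== CLAIM (what is proved, stated in full; the proofs are below) =====
def Claim_equal_upgraded_mover : Prop := ∀ (stacklist : List (List String)) (moves : List (List (List Int))), Dom_upgraded_mover stacklist moves → Pre_upgraded_mover stacklist moves → Spec_upgraded_mover stacklist moves (upgraded_mover stacklist moves)

-- ===== LEMMAS AND PROOFS =====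

theorem pvNorm_lt (i : Int) (n : Nat) (h1 : -(n : Int) ≤ i) (h2 : i < n) : pvNorm i n < n := by
  unfold pvNorm; split <;> omega

-- pySetD / pyGetD on any in-range Int index, written with the normalised Nat index.
theorem pySetD_inrange {α : Type} (xs : List α) (i : Int) (v : α)
    (h1 : -(xs.length : Int) ≤ i) (h2 : i < xs.length) :
    PySem.List.pySetD xs i v = xs.set (pvNorm i xs.length) v := by
  unfold PySem.List.pySetD PySem.List.pySet? PySem.List.pyIdx? pvNorm
  by_cases h : 0 ≤ i
  · rw [if_pos h, if_pos h2, if_neg (by omega)]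
    simp
  · rw [if_neg h, if_pos h1, if_pos (by omega)]
    simp only [Option.map_some, Option.getD_some]
    congr 1; omega

theorem pyGetD_inrange {α : Type} (xs : List α) (i : Int) (d : α)
    (h1 : -(xs.length : Int) ≤ i) (h2 : i < xs.length) :
    PySem.List.pyGetD xs i d = xs.getD (pvNorm i xs.length) d := by
  by_cases h : 0 ≤ i
  · rw [PySem.List.pyGetD_eq_getElem xs d h h2, List.getD_eq_getElem _ _ (pvNorm_lt i xs.length h1 h2)]
    congr 1; unfold pvNorm; rw [if_neg (by omega)]
  · have hk1 : 0 < (-i).toNat := by omega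
    have hk2 : (-i).toNat ≤ xs.length := by omega
    have hi : i = -(((-i).toNat : Nat) : Int) := by omega
    rw [hi, PySem.List.pyGetD_neg_natCast _ _ _ hk1 hk2,
        List.getD_eq_getElem _ _ (by unfold pvNorm; split <;> omega)]
    congr 1
    unfold pvNorm; split <;> omega

theorem pvPopLoopA_eq (k : Nat) : ∀ (st : List (List String)) (temp : List String) (i : Int)
    (si : Nat) (h1 : -(st.length : Int) ≤ i) (h2 : i < st.length)
    (hnorm : pvNorm i st.length = si) (hsi : si < st.length) (hk : k ≤ st[si].length),
    pvPopLoopA st temp i k =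
      (st.set si (st[si].take (st[si].length - k)),
       temp ++ (st[si].drop (st[si].length - k)).reverse) := by
  induction k with
  | zero =>
    intro st temp i si h1 h2 hnorm hsi hk
    simp [pvPopLoopA, List.set_getElem_self]
  | succ k ih =>
    intro st temp i si h1 h2 hnorm hsi hk
    have hne : st[si] ≠ [] := by
      intro h; rw [h] at hk; simp at hk
    obtain ⟨ys, x, hsx⟩ : ∃ ys x, st[si] = ys ++ [x] := by
      rcases List.eq_nil_or_concat st[si] with h | ⟨ys, x, h⟩
      · exact absurd h hne
      · exact ⟨ys, x, by simpa using h⟩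
    rw [pvPopLoopA, pyGetD_inrange st i [] h1 h2, hnorm, List.getD_eq_getElem _ _ hsi]
    rw [hsx, PySem.List.pop?_last]
    simp only
    rw [pySetD_inrange st i ys h1 h2, hnorm]
    have hsi' : si < (st.set si ys).length := by simpa using hsi
    have hget : (st.set si ys)[si]'hsi' = ys := by simp
    have hk' : k ≤ ys.length := by
      have : st[si].length = ys.length + 1 := by rw [hsx]; simp
      omega
    rw [ih (st.set si ys) (temp ++ [x]) i si (by simpa using h1) (by simpa using h2)
        (by simpa using hnorm) hsi' (by rw [hget]; exact hk')]
    have hta : List.take ((ys ++ [x]).length - (k + 1)) (ys ++ [x]) = List.take (ys.length - k) ys := by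
      simp only [List.length_append, List.length_singleton]
      rw [List.take_append_of_le_length (by omega)]
      congr 1
      omega
    have hdr : List.drop ((ys ++ [x]).length - (k + 1)) (ys ++ [x]) = List.drop (ys.length - k) ys ++ [x] := by
      simp only [List.length_append, List.length_singleton]
      rw [List.drop_append_of_le_length (by omega)]
      congr 2
      omega
    simp only [hget, hta, hdr]
    simp [List.set_set, List.append_assoc]

theorem pvAppendLoopA_eq (k : Nat) : ∀ (st : List (List String)) (temp : List String) (i : Int)
    (ti : Nat) (h1 : -(st.length : Int) ≤ i) (h2 : i < st.length)
    (hnorm : pvNorm i st.length = ti) (hti : ti < st.length) (hk : temp.length = k),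
    pvAppendLoopA st temp i k = (st.set ti (st[ti] ++ temp.reverse), []) := by
  induction k with
  | zero =>
    intro st temp i ti h1 h2 hnorm hti hk
    rw [List.length_eq_zero_iff] at hk
    subst hk
    simp [pvAppendLoopA, List.set_getElem_self]
  | succ k ih =>
    intro st temp i ti h1 h2 hnorm hti hk
    obtain ⟨ys, x, hsx⟩ : ∃ ys x, temp = ys ++ [x] := by
      rcases List.eq_nil_or_concat temp with h | ⟨ys, x, h⟩
      · rw [h] at hk; simp at hk
      · exact ⟨ys, x, by simpa using h⟩
    subst hsx
    rw [pvAppendLoopA, PySem.List.pop?_last]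
    simp only
    rw [pyGetD_inrange st i [] h1 h2, hnorm, List.getD_eq_getElem _ _ hti,
        pySetD_inrange st i _ h1 h2, hnorm]
    have hti' : ti < (st.set ti (st[ti] ++ [x])).length := by simpa using hti
    have hget : (st.set ti (st[ti] ++ [x]))[ti]'hti' = st[ti] ++ [x] := by simp
    rw [ih _ ys i ti (by simpa using h1) (by simpa using h2) (by simpa using hnorm) hti'
        (by simpa using hk)]
    simp [hget, List.set_set, List.append_assoc]

theorem pvRow1 (c s t : Int) (r1 : List Int) : PySem.List.pyGetD (c :: s :: t :: r1) 1 0 = s := by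
  rw [PySem.List.pyGetD_eq_getElem _ _ (by norm_num) (by simp; omega)]
  rfl

theorem pvRow2 (c s t : Int) (r1 : List Int) : PySem.List.pyGetD (c :: s :: t :: r1) 2 0 = t := by
  rw [PySem.List.pyGetD_eq_getElem _ _ (by norm_num) (by simp; omega)]
  rfl

-- One move, with pvStep? succeeding on the height vector: the two ports' moves agree,
-- and the height vector of the result is pvStep?'s output.
theorem pvMove_core (st : List (List String)) (m : List (List Int)) (lens' : List Nat)
    (h : pvStep? (st.map List.length) m = some lens') :
    pvMoveA st m = pvMoveB st m ∧ (pvMoveB st m).map List.length = lens' := by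
  rcases m with _ | ⟨row, r2⟩
  · simp [pvStep?] at h
  rcases row with _ | ⟨c, row⟩
  · simp [pvStep?] at h
  rcases row with _ | ⟨s, row⟩
  · simp [pvStep?] at h
  rcases row with _ | ⟨t, r1⟩
  · simp [pvStep?] at h
  simp only [pvStep?, List.length_map] at h
  by_cases hpos : 0 < c
  · rw [if_neg (by omega)] at h
    by_cases hb : -(st.length : Int) ≤ s - 1 ∧ s - 1 < (st.length : Int) ∧
        -(st.length : Int) ≤ t - 1 ∧ t - 1 < (st.length : Int)
    · rw [if_pos hb] at h
      obtain ⟨hb1, hb2, hb3, hb4⟩ := hb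
      set si := pvNorm (s - 1) st.length with hsidef
      set ti := pvNorm (t - 1) st.length with htidef
      have hsi : si < st.length := pvNorm_lt _ _ hb1 hb2
      have hti : ti < st.length := pvNorm_lt _ _ hb3 hb4
      clear_value si ti
      have hgetD : (st.map List.length).getD si 0 = st[si].length := by
        rw [List.getD_eq_getElem _ _ (by simpa using hsi)]; simp
      by_cases hcle : c.toNat ≤ st[si].length
      · rw [if_pos (by rw [hgetD]; exact hcle)] at h
        have hlens' : lens' = ((st.map List.length).set si (st[si].length - c.toNat)).set ti
            (((st.map List.length).set si (st[si].length - c.toNat)).getD ti 0 + c.toNat) := by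
          rw [hgetD] at h; exact (Option.some_injective _ h).symm
        have hA : pvMoveA st ((c :: s :: t :: r1) :: r2) =
            (st.set si (st[si].take (st[si].length - c.toNat))).set ti
              ((st.set si (st[si].take (st[si].length - c.toNat))).getD ti [] ++
                st[si].drop (st[si].length - c.toNat)) := by
          unfold pvMoveA
          simp only [PySem.List.pyGetD_zero_cons, pvRow1, pvRow2]
          rw [pvPopLoopA_eq c.toNat st [] (s - 1) si hb1 hb2 hsidef.symm hsi hcle]
          simp only [List.nil_append]
          rw [pvAppendLoopA_eq c.toNat _ _ (t - 1) ti (by simpa using hb3) (by simpa using hb4)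
              (by simpa using htidef.symm) (by simpa using hti) (by simp; omega)]
          rw [List.reverse_reverse, List.getD_eq_getElem _ _ (by simpa using hti)]
        have hcK : -c = -((c.toNat : Nat) : Int) := by omega
        have hB : pvMoveB st ((c :: s :: t :: r1) :: r2) =
            (st.set ti (st[ti] ++ st[si].drop (st[si].length - c.toNat))).set si
              (List.take
                (((st.set ti (st[ti] ++ st[si].drop (st[si].length - c.toNat))).getD si []).length - c.toNat)
                ((st.set ti (st[ti] ++ st[si].drop (st[si].length - c.toNat))).getD si [])) := by
          unfold pvMoveB
          simp only [PySem.List.pyGetD_zero_cons, pvRow1, pvRow2]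
          rw [if_pos hpos, hcK]
          rw [pyGetD_inrange st (s - 1) [] hb1 hb2, ← hsidef, List.getD_eq_getElem _ _ hsi]
          rw [PySem.List.slice_from_neg_natCast _ _ (by omega)]
          rw [pyGetD_inrange st (t - 1) [] hb3 hb4, ← htidef, List.getD_eq_getElem _ _ hti]
          rw [pySetD_inrange st (t - 1) _ hb3 hb4, ← htidef]
          rw [pyGetD_inrange _ (s - 1) _ (by simpa using hb1) (by simpa using hb2)]
          rw [pySetD_inrange _ (s - 1) _ (by simpa using hb1) (by simpa using hb2)]
          simp only [List.length_set, ← hsidef]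
          rw [PySem.List.slice_to_neg_natCast _ _ (by omega)]
        have hdl : (st[si].drop (st[si].length - c.toNat)).length = c.toNat := by
          simp; omega
        by_cases hst : si = ti
        · subst hst
          have hA' : pvMoveA st ((c :: s :: t :: r1) :: r2) = st := by
            rw [hA, List.getD_eq_getElem _ _ (by simpa using hsi), List.getElem_set_self,
                List.set_set, List.take_append_drop, List.set_getElem_self]
          have hB' : pvMoveB st ((c :: s :: t :: r1) :: r2) = st := by
            rw [hB, List.getD_eq_getElem _ _ (by simpa using hsi), List.getElem_set_self]
            have h1 : (st[si] ++ st[si].drop (st[si].length - c.toNat)).length - c.toNat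
                = st[si].length := by simp [hdl]
            rw [h1, List.take_append_of_le_length (le_refl _), List.take_length,
                List.set_set, List.set_getElem_self]
          refine ⟨by rw [hA', hB'], ?_⟩
          rw [hB', hlens', List.getD_eq_getElem _ _ (by simpa using hsi), List.getElem_set_self,
              List.set_set]
          have h2 : st[si].length - c.toNat + c.toNat = st[si].length := by omega
          rw [h2]
          have h3 : (st.map List.length)[si]'(by simpa using hsi) = st[si].length := by simp
          rw [← h3, List.set_getElem_self]
        · have hA' : pvMoveA st ((c :: s :: t :: r1) :: r2) =
              (st.set si (st[si].take (st[si].length - c.toNat))).set ti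
                (st[ti] ++ st[si].drop (st[si].length - c.toNat)) := by
            rw [hA, List.getD_eq_getElem _ _ (by simpa using hti),
                List.getElem_set_ne (by omega)]
          have hB' : pvMoveB st ((c :: s :: t :: r1) :: r2) =
              (st.set ti (st[ti] ++ st[si].drop (st[si].length - c.toNat))).set si
                (st[si].take (st[si].length - c.toNat)) := by
            rw [hB, List.getD_eq_getElem _ _ (by simpa using hsi),
                List.getElem_set_ne (by omega)]
          refine ⟨by rw [hA', hB', List.set_comm _ _ (by omega : si ≠ ti)], ?_⟩
          rw [hB', hlens', List.map_set, List.map_set,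
              List.getD_eq_getElem _ _ (by simpa using hti), List.getElem_set_ne (by omega)]
          simp only [List.length_append, List.length_take, hdl, List.getElem_map]
          have hmin : min (st[si].length - c.toNat) st[si].length = st[si].length - c.toNat := by
            omega
          rw [hmin, List.set_comm _ _ (by omega : ti ≠ si)]
      · rw [if_neg (by rw [hgetD]; exact hcle)] at h
        simp at h
    · rw [if_neg hb] at h
      simp at h
  · rw [if_pos (by omega)] at h
    have hlens : lens' = st.map List.length := by simpa using h.symm
    have hk0 : c.toNat = 0 := by omega
    have hA : pvMoveA st ((c :: s :: t :: r1) :: r2) = st := by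
      simp [pvMoveA, PySem.List.pyGetD_zero_cons, pvRow1, pvRow2, hk0, pvPopLoopA, pvAppendLoopA]
    have hB : pvMoveB st ((c :: s :: t :: r1) :: r2) = st := by
      simp [pvMoveB, PySem.List.pyGetD_zero_cons, hpos]
    rw [hA, hB, hlens]
    exact ⟨rfl, rfl⟩

theorem pvFold_eq : ∀ (ms : List (List (List Int))) (st : List (List String)) (lensf : List Nat),
    pvSim (st.map List.length) ms = some lensf →
    ms.foldl pvMoveA st = ms.foldl pvMoveB st := by
  intro ms
  induction ms with
  | nil => intro st lensf h; rfl
  | cons m ms ih =>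
    intro st lensf h
    cases hstep : pvStep? (st.map List.length) m with
    | none => rw [show pvSim (List.map List.length st) (m :: ms) = none by simp [pvSim, hstep]] at h; exact absurd h (by simp)
    | some l' =>
      obtain ⟨hAB, hlen⟩ := pvMove_core st m l' hstep
      rw [List.foldl_cons, List.foldl_cons, hAB]
      apply ih (pvMoveB st m) lensf
      rw [hlen]
      simpa [pvSim, hstep] using h

theorem pvAnswer_eq (stack : List String) :
    ((PySem.List.pop? stack (-1)).map Prod.fst).getD "" = PySem.List.pyGetD stack (-1) "" := by
  induction stack using List.reverseRecOn with
  | nil => rfl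
  | append_singleton ys x _ =>
    rw [PySem.List.pop?_last, PySem.List.pyGetD_neg_one_append_singleton]
    rfl

-- ===== VERDICT (by name: the statement is the Claim_ definition above) =====
theorem upgraded_mover_spec : Claim_equal_upgraded_mover := by
  intro stacklist moves _ hpre
  unfold Pre_upgraded_mover at hpre
  unfold Spec_upgraded_mover upgraded_mover upgraded_mover_alt
  cases hsim : pvSim (stacklist.map List.length) moves with
  | none => rw [hsim] at hpre; exact absurd hpre (by simp)
  | some l =>
    rw [pvFold_eq moves stacklist l hsim]
    simp only [pvAnswer_eq]
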